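-- pv_equiv track=rewrite | github.com/kevinbentley/popper_explainer | src/theorem/signature.py | extract_role_tokens
-- ===== SOURCE A (Python) =====
-- def extract_role_tokens(signature: str) -> dict[str, list[str]]:
--     """Extract tokens by role from a role-coded signature.
--
--     Args:
--         signature: Role-coded signature string
--
--     Returns:
--         Dict mapping role prefixes to lists of tokens
--     """
--     result: dict[str, list[str]] = {
--         "C": [],  # confirms
--         "X": [],  # constrains
--         "R": [],  # refutes
--         "DEF": [],  # definition missing
--         "LOC": [],  # local structure missing
--         "TMP": [],  # temporal structure missing
--         "MEC": [],  # mechanism missing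
--         "FM": [],  # failure mode
--     }
--
--     for token in signature.split():
--         if ":" in token:
--             prefix, value = token.split(":", 1)
--             if prefix in result:
--                 result[prefix].append(value)
--
--     return result
-- ===== SOURCE B (Python) =====
-- ROLES = ["C", "X", "R", "DEF", "LOC", "TMP", "MEC", "FM"]
--
--
-- def extract_role_tokens(signature: str) -> dict[str, list[str]]:
--     """Extract tokens by role from a role-coded signature."""
--     pairs = [token.split(":", 1) for token in signature.split() if ":" in token]
--     return {role: [v for p, v in pairs if p == role] for role in ROLES}
-- ===== Notes on version B (the rewrite author's own statement) =====
-- stated objective: idiomatic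
-- what changed: Replaced the single dispatching loop that mutates a pre-built dict with a pre-parse of all role:value pairs followed by a dict comprehension doing one filtering scan per fixed role.
import Mathlib
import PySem

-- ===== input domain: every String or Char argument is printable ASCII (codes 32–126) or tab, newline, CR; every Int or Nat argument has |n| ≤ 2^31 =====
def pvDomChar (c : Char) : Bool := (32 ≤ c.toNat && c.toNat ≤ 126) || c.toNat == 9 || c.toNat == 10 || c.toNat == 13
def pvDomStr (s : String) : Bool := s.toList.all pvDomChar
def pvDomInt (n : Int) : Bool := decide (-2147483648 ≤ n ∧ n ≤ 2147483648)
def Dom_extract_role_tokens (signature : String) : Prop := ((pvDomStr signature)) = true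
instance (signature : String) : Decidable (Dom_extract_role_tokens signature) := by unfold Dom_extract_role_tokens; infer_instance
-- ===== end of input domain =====

-- B pre-parses the tokens into (prefix, value) pairs once and then builds the result
-- with one filtering scan per fixed role, instead of A's single loop mutating a pre-built dict.

-- ===== PORT A =====
def extract_role_tokens (signature : String) : List (String × List String) :=
  let result : PySem.Dict String (List String) :=
    PySem.Dict.ofList
      [("C", []), ("X", []), ("R", []), ("DEF", []), ("LOC", []), ("TMP", []), ("MEC", []), ("FM", [])]
  let result := (PySem.Str.split₀ signature).foldl (fun result token =>
    if PySem.Str.isIn ":" token then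
      match PySem.Str.splitMax? token ":" 1 with
      | some [pfx, value] =>
          if result.contains pfx then result.modify pfx [] (fun l => l ++ [value]) else result
      | _ => result          -- unreachable: split(":", 1) with ":" in token yields exactly 2 pieces
    else result) result
  result.items

-- ===== PORT B =====
def pvROLES : List String := ["C", "X", "R", "DEF", "LOC", "TMP", "MEC", "FM"]

def extract_role_tokens_alt (signature : String) : List (String × List String) :=
  let pairs : List (String × String) := (PySem.Str.split₀ signature).filterMap (fun token =>
    if PySem.Str.isIn ":" token then
      -- 'prefix, value = token.split(":", 1)': the unpack of the exactly-two pieces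
      (PySem.Str.splitMax? token ":" 1).bind (fun parts =>
        if parts.length == 2 then some (parts.headD "", (parts.drop 1).headD "") else none)
    else none)
  pvROLES.map (fun role => (role, (pairs.filter (fun pv => pv.1 == role)).map (fun pv => pv.2)))

-- ===== PRECONDITION & SPEC =====
def Spec_extract_role_tokens (signature : String) (out : List (String × List String)) : Prop := out = extract_role_tokens_alt signature
instance (signature : String) (out : List (String × List String)) : Decidable (Spec_extract_role_tokens signature out) := by unfold Spec_extract_role_tokens; infer_instance

-- ===== CLAIM (what is proved, stated in full; the proofs are below) =====
def Claim_equal_extract_role_tokens : Prop := ∀ (signature : String), Dom_extract_role_tokens signature → Spec_extract_role_tokens signature (extract_role_tokens signature)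

-- ===== LEMMAS AND PROOFS =====

-- contains on a dict whose items are `rs.map (fun r => (r, f r))`
lemma pv_contains_mk_map (rs : List String) (f : String → List String) (p : String) :
    (PySem.Dict.mk (rs.map (fun r => (r, f r)))).contains p = rs.contains p := by
  simp [PySem.Dict.contains, List.any_map, Function.comp_def, List.any_beq']

-- getD on such a dict, when the key is present, returns f p
lemma pv_getD_mk_map (rs : List String) (f : String → List String) (p : String)
    (h : rs.contains p = true) :
    (PySem.Dict.mk (rs.map (fun r => (r, f r)))).getD p [] = f p := by
  induction rs with
  | nil => simp at h
  | cons r rs ih =>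
    by_cases hrp : r = p
    · subst hrp
      simp [PySem.Dict.getD, PySem.Dict.get?, List.find?]
    · have hpr : (r == p) = false := by simp [hrp]
      have h' : rs.contains p = true := by
        have hm : p ∈ r :: rs := by simpa using h
        rcases List.mem_cons.mp hm with h1 | h1
        · exact absurd h1.symm hrp
        · simpa using h1
      simpa [PySem.Dict.getD, PySem.Dict.get?, List.find?, hpr] using ih h'

-- modify (append v) on such a dict updates exactly the key's entry
lemma pv_modify_mk_map (rs : List String) (f : String → List String) (p v : String)
    (h : rs.contains p = true) :
    (PySem.Dict.mk (rs.map (fun r => (r, f r)))).modify p [] (fun l => l ++ [v])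
      = PySem.Dict.mk (rs.map (fun r => (r, if r == p then f r ++ [v] else f r))) := by
  have hc := pv_contains_mk_map rs f p
  rw [PySem.Dict.modify, pv_getD_mk_map rs f p h, PySem.Dict.insert]
  rw [hc, h]
  simp only [if_true]
  apply PySem.Dict.ext
  simp only [PySem.Dict.items, List.map_map]
  apply List.map_congr_left
  intro r _
  by_cases hrp : r = p
  · subst hrp; simp
  · simp [Function.comp, hrp]

-- one element of B's pre-parse
def pvParse (token : String) : Option (String × String) :=
  if PySem.Str.isIn ":" token then
    (PySem.Str.splitMax? token ":" 1).bind (fun parts =>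
      if parts.length == 2 then some (parts.headD "", (parts.drop 1).headD "") else none)
  else none

-- A's loop step
def pvStep (d : PySem.Dict String (List String)) (token : String) : PySem.Dict String (List String) :=
  if PySem.Str.isIn ":" token then
    match PySem.Str.splitMax? token ":" 1 with
    | some [pfx, value] =>
        if d.contains pfx then d.modify pfx [] (fun l => l ++ [value]) else d
    | _ => d
  else d

-- main invariant: folding A's step over tokens, starting from any dict of shape rs.map (r, f r),
-- yields for each role its old list extended by the values of its parsed pairs
lemma pv_loop (ts : List String) (rs : List String) (f : String → List String) :
    (ts.foldl pvStep (PySem.Dict.mk (rs.map (fun r => (r, f r))))).items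
      = rs.map (fun r =>
          (r, f r ++ (((ts.filterMap pvParse).filter (fun pv => pv.1 == r)).map (fun pv => pv.2)))) := by
  induction ts generalizing f with
  | nil => simp [PySem.Dict.items]
  | cons t ts ih =>
    simp only [List.foldl_cons, List.filterMap_cons]
    rcases hp : pvParse t with _ | ⟨p, v⟩
    · have hstep : pvStep (PySem.Dict.mk (rs.map (fun r => (r, f r)))) t
          = PySem.Dict.mk (rs.map (fun r => (r, f r))) := by
        unfold pvStep
        unfold pvParse at hp
        split_ifs at hp with h1
        · rw [if_pos h1]
          rcases hsp : PySem.Str.splitMax? t ":" 1 with _ | l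
          · rfl
          · rw [hsp] at hp
            rcases l with _ | ⟨a, _ | ⟨b, _ | _⟩⟩ <;> simp_all
        · rw [if_neg h1]
      rw [hstep, ih]
    · have hstep : pvStep (PySem.Dict.mk (rs.map (fun r => (r, f r)))) t
          = if rs.contains p then
              PySem.Dict.mk (rs.map (fun r => (r, if r == p then f r ++ [v] else f r)))
            else PySem.Dict.mk (rs.map (fun r => (r, f r))) := by
        have hc := pv_contains_mk_map rs f p
        unfold pvStep
        unfold pvParse at hp
        split_ifs at hp with h1
        · rw [if_pos h1]
          rcases hsp : PySem.Str.splitMax? t ":" 1 with _ | l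
          · rw [hsp] at hp; simp at hp
          · rw [hsp] at hp
            rcases l with _ | ⟨a, _ | ⟨b, _ | _⟩⟩ <;> simp at hp
            · obtain ⟨rfl, rfl⟩ := hp
              show (if (PySem.Dict.mk (rs.map (fun r => (r, f r)))).contains a = true then _ else _) = _
              rw [hc]
              by_cases hm2 : rs.contains a = true
              · rw [hm2]
                simp only [if_true]
                exact pv_modify_mk_map rs f a b hm2
              · have hm3 : rs.contains a = false := by simpa using hm2
                rw [hm3]
                simp
      rw [hstep]
      by_cases hmem : rs.contains p = true
      · rw [hmem]
        simp only [if_true]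
        rw [ih]
        apply List.map_congr_left
        intro r _
        by_cases hrp : r = p
        · subst hrp
          simp
        · have hne : (p == r) = false := beq_eq_false_iff_ne.mpr (fun hh => hrp hh.symm)
          simp [List.filter_cons, hne, hrp]
      · have hm3 : rs.contains p = false := by simpa using hmem
        rw [hm3]
        simp only [Bool.false_eq_true, if_false]
        rw [ih]
        apply List.map_congr_left
        intro r hr
        have hnot : p ∉ rs := by simpa using hm3
        have hne : (p == r) = false := by
          refine beq_eq_false_iff_ne.mpr ?_
          rintro rfl
          exact hnot hr
        simp [List.filter_cons, hne]

-- initial literal dict of A is the mk-map over pvROLES with all values []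
lemma pv_init :
    PySem.Dict.ofList
        ([("C", []), ("X", []), ("R", []), ("DEF", []), ("LOC", []), ("TMP", []), ("MEC", []), ("FM", [])] :
          List (String × List String))
      = PySem.Dict.mk (pvROLES.map (fun r => (r, ([] : List String)))) := by
  decide

-- ===== VERDICT (by name: the statement is the Claim_ definition above) =====
theorem extract_role_tokens_spec : Claim_equal_extract_role_tokens := by
  intro signature _
  unfold Spec_extract_role_tokens extract_role_tokens extract_role_tokens_alt
  simp only
  rw [show (fun (result : PySem.Dict String (List String)) (token : String) =>
        if PySem.Str.isIn ":" token then
          match PySem.Str.splitMax? token ":" 1 with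
          | some [pfx, value] =>
              if result.contains pfx then result.modify pfx [] (fun l => l ++ [value]) else result
          | _ => result
        else result) = pvStep from rfl]
  rw [show (fun (token : String) =>
        if PySem.Str.isIn ":" token then
          (PySem.Str.splitMax? token ":" 1).bind (fun parts =>
            if parts.length == 2 then some (parts.headD "", (parts.drop 1).headD "") else none)
        else none) = pvParse from rfl]
  rw [pv_init, pv_loop]
  simp
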